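-- pv_equiv track=rewrite | github.com/JonasLow/CS1010E | Tutorials/Midterms/PracticePaper3.py | f
-- ===== SOURCE A (Python) =====
-- def f(n, d):
--     result, weight = 0, 1
--     while n > 0:
--         if n%10 != d:
--             result = result + n%10*weight
--             weight = weight * 10
--         n = n // 10
--     return result
-- ===== SOURCE B (Python) =====
-- def f(n, d):
--     if n <= 0:
--         return 0
--     q, r = divmod(n, 10)
--     rest = f(q, d)
--     return rest if r == d else rest * 10 + r
-- ===== Notes on version B (the rewrite author's own statement) =====
-- stated objective: alternative
-- what changed: Replaces the iterative least-significant-first loop with a (result, weight) accumulator pair by a direct recursion that strips the low digit, recurses on the quotient and reassembles the kept digits most-significant-first with rest*10+r, needing no weight state.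
import Mathlib
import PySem

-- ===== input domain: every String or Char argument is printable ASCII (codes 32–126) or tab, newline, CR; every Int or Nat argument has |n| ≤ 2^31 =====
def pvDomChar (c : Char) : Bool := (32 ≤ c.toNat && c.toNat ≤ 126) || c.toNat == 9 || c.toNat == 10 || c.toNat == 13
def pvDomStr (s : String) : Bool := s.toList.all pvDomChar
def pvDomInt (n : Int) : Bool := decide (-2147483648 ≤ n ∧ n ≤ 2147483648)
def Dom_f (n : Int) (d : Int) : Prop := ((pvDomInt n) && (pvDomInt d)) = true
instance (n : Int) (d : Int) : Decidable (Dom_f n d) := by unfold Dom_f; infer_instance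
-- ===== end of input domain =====

-- B replaces A's iterative LSB loop with (result, weight) accumulators by a direct
-- recursion reassembling kept digits as rest*10+r (alternative decomposition, same cost).


-- ===== PORT A =====
-- termination: n // 10 shrinks n.toNat while n > 0
theorem pvFloordivTen_lt (n : Int) (h : 0 < n) :
    (PySem.Int.floordiv n 10).toNat < n.toNat := by
  rw [PySem.Int.floordiv_eq_ediv_of_pos (by omega)]
  omega

-- the while-loop of A, state (n, result, weight)
def fLoop (d n result weight : Int) : Int :=
  if h : 0 < n then
    if PySem.Int.mod n 10 ≠ d then
      fLoop d (PySem.Int.floordiv n 10) (result + PySem.Int.mod n 10 * weight) (weight * 10)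
    else
      fLoop d (PySem.Int.floordiv n 10) result weight
  else result
termination_by n.toNat
decreasing_by all_goals exact pvFloordivTen_lt n h

def f (n : Int) (d : Int) : Int := fLoop d n 0 1

-- ===== PORT B =====
def f_alt (n : Int) (d : Int) : Int :=
  if h : 0 < n then
    -- q, r = divmod(n, 10)
    let q := PySem.Int.floordiv n 10
    let r := PySem.Int.mod n 10
    let rest := f_alt q d
    if r = d then rest else rest * 10 + r
  else 0
termination_by n.toNat
decreasing_by exact pvFloordivTen_lt n h

-- ===== PRECONDITION & SPEC =====
def Spec_f (n : Int) (d : Int) (out : Int) : Prop := out = f_alt n d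
instance (n : Int) (d : Int) (out : Int) : Decidable (Spec_f n d out) := by unfold Spec_f; infer_instance

-- ===== CLAIM (what is proved, stated in full; the proofs are below) =====
def Claim_equal_f : Prop := ∀ (n : Int) (d : Int), Dom_f n d → Spec_f n d (f n d)

-- ===== LEMMAS AND PROOFS =====
-- loop invariant: fLoop d n result weight = result + weight * f_alt n d
theorem fLoop_spec (N : Nat) : ∀ (n d result weight : Int), n.toNat ≤ N →
    fLoop d n result weight = result + weight * f_alt n d := by
  induction N with
  | zero =>
    intro n d result weight hN
    rw [fLoop, f_alt]
    have hn : ¬ 0 < n := by omega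
    simp [hn]
  | succ N ih =>
    intro n d result weight hN
    rw [fLoop, f_alt]
    by_cases hn : 0 < n
    · have hq : (PySem.Int.floordiv n 10).toNat ≤ N := by
        have := pvFloordivTen_lt n hn; omega
      by_cases hd : PySem.Int.mod n 10 = d
      · simp only [hn, dif_pos, hd,
          ih (PySem.Int.floordiv n 10) d result weight hq]
        simp
      · simp only [hn, dif_pos, hd, ne_eq, not_false_iff, ite_true, ite_false,
          ih (PySem.Int.floordiv n 10) d _ _ hq]
        ring
    · simp [hn]

-- ===== VERDICT (by name: the statement is the Claim_ definition above) =====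
theorem f_spec : Claim_equal_f := by
  intro n d _
  unfold Spec_f f
  simpa using fLoop_spec n.toNat n d 0 1 le_rfl
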